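-- pv_equiv track=rewrite | github.com/erik-whiting/ss_confidence_scorer | calculate_additional_data.py | get_longest_nt
-- ===== SOURCE A (Python) =====
-- def get_longest_nt(seq, nt):
--     largest = 0
--     for i in range(1, len(seq)):
--         needle = nt * i
--         if needle in seq:
--             largest = i
--         else:
--             break
--     return largest
-- ===== SOURCE B (Python) =====
-- def get_longest_nt(seq, nt):
--     # Binary search over the (monotone) repeat count instead of A's linear scan.
--     lo, hi = 0, len(seq) // len(nt)
--     while lo < hi:
--         mid = (lo + hi + 1) // 2
--         if nt * mid in seq:
--             lo = mid
--         else: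
--             hi = mid - 1
--     return lo
-- ===== Notes on version B (the rewrite author's own statement) =====
-- stated objective: alternative
-- what changed: A linearly tries repeat counts 1,2,3,... each with a substring test until one fails; B binary-searches the monotone predicate 'nt*k in seq' over [0, len(seq)//len(nt)], doing O(log n) substring tests instead of a linear count.
-- intended difference: When nt is a single character and seq is non-empty and consists entirely of that character, A's loop bound range(1, len(seq)) caps its answer at len(seq)-1 while B returns the true repeat count len(seq), which is the intended longest run. — e.g. on get_longest_nt("aa", "a"): A returns 1, B returns 2
-- outside the precondition, e.g. on get_longest_nt('abc', ''): A returns 2, B raises ZeroDivisionError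
import Mathlib
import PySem

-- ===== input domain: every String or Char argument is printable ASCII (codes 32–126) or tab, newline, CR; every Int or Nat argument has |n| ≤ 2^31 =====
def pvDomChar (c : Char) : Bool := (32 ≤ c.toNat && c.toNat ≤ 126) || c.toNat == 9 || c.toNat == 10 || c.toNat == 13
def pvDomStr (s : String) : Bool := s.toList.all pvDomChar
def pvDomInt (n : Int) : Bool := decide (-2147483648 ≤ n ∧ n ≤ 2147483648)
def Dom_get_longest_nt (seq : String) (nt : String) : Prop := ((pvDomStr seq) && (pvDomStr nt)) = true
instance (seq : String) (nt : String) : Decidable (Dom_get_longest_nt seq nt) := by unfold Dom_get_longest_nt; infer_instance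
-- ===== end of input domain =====

-- B replaces A's linear scan over repeat counts by a binary search on the monotone
-- predicate "nt*k in seq" (objective: alternative algorithm, O(log n) containment tests).

-- ===== PORT A =====
-- the for-loop with break: recursion over the range list, carrying `largest`
def pvALoop (s nt : List Char) : List Int → Int → Int
  | [], largest => largest
  | i :: rest, largest =>
    let needle := PySem.List.pyRepeat nt i        -- nt * i
    if PySem.Chars.isIn needle s                  -- needle in seq
    then pvALoop s nt rest i                      -- largest = i
    else largest                                  -- break

def get_longest_nt (seq : String) (nt : String) : Int :=
  pvALoop seq.toList nt.toList (PySem.List.pyRange 1 (PySem.Str.len seq) 1) 0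

-- ===== PORT B =====
-- the while-loop: fuel-bounded recursion on (lo, hi); fuel = initial hi - lo suffices
def pvBSearch (s nt : List Char) : Nat → Int → Int → Int
  | 0, lo, _ => lo
  | fuel + 1, lo, hi =>
    if lo < hi then
      let mid := PySem.Int.floordiv (lo + hi + 1) 2
      if PySem.Chars.isIn (PySem.List.pyRepeat nt mid) s
      then pvBSearch s nt fuel mid hi
      else pvBSearch s nt fuel lo (mid - 1)
    else lo

def get_longest_nt_alt (seq : String) (nt : String) : Int :=
  let hi := PySem.Int.floordiv (PySem.Str.len seq) (PySem.Str.len nt)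
  pvBSearch seq.toList nt.toList hi.toNat 0 hi

-- ===== PRECONDITION & SPEC =====
-- Pre_ excludes empty nt only: there B raises ZeroDivisionError, while A's value
-- len(seq)-1 is an arbitrary answer to the ill-posed "repetitions of the empty string".
def Pre_get_longest_nt (seq : String) (nt : String) : Prop := nt.toList ≠ []
instance (seq : String) (nt : String) : Decidable (Pre_get_longest_nt seq nt) := by
  unfold Pre_get_longest_nt; infer_instance

def pvWitness_get_longest_nt : String × String := ("abcbb", "b")

-- When nt is a single character and seq is non-empty and consists entirely of that
-- character, A's loop bound range(1, len(seq)) caps its answer at len(seq)-1, while B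
-- returns the true repeat count len(seq), the intended longest run.
def D_get_longest_nt (seq : String) (nt : String) : Prop :=
  nt.toList.length = 1 ∧ seq.toList ≠ [] ∧ seq.toList.all (fun c => nt.toList.contains c) = true
instance (seq : String) (nt : String) : Decidable (D_get_longest_nt seq nt) := by
  unfold D_get_longest_nt; infer_instance

def Spec_get_longest_nt (seq : String) (nt : String) (out : Int) : Prop :=
  ¬ D_get_longest_nt seq nt → out = get_longest_nt_alt seq nt
instance (seq : String) (nt : String) (out : Int) : Decidable (Spec_get_longest_nt seq nt out) := by
  unfold Spec_get_longest_nt; infer_instance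

def pvDiffWitness_get_longest_nt : String × String := ("aa", "a")
def pvDiffWitnessOut_get_longest_nt : Int × Int := (1, 2)

-- ===== CLAIM (what is proved, stated in full; the proofs are below) =====
def Claim_unchanged_get_longest_nt : Prop := ∀ (seq : String) (nt : String), Dom_get_longest_nt seq nt → Pre_get_longest_nt seq nt → Spec_get_longest_nt seq nt (get_longest_nt seq nt)
def Claim_changed_get_longest_nt : Prop := Dom_get_longest_nt (pvDiffWitness_get_longest_nt.1) (pvDiffWitness_get_longest_nt.2) ∧ Pre_get_longest_nt (pvDiffWitness_get_longest_nt.1) (pvDiffWitness_get_longest_nt.2) ∧ D_get_longest_nt (pvDiffWitness_get_longest_nt.1) (pvDiffWitness_get_longest_nt.2) ∧ get_longest_nt (pvDiffWitness_get_longest_nt.1) (pvDiffWitness_get_longest_nt.2) = pvDiffWitnessOut_get_longest_nt.1 ∧ get_longest_nt_alt (pvDiffWitness_get_longest_nt.1) (pvDiffWitness_get_longest_nt.2) = pvDiffWitnessOut_get_longest_nt.2 ∧ pvDiffWitnessOut_get_longest_nt.1 ≠ pvDiffWitnessOut_get_longest_nt.2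
def Claim_exact_get_longest_nt : Prop := ∀ (seq : String) (nt : String), Dom_get_longest_nt seq nt → Pre_get_longest_nt seq nt → D_get_longest_nt seq nt → get_longest_nt seq nt ≠ get_longest_nt_alt seq nt

-- ===== LEMMAS AND PROOFS =====

-- "nt * k in seq", the monotone predicate both loops test
def pvQ (s nt : List Char) (k : Nat) : Bool := PySem.Chars.isIn (PySem.List.pyRepeat nt (k : Int)) s

-- the greatest k ≤ len(seq) with nt*k in seq
def pvK (s nt : List Char) : Nat := Nat.findGreatest (fun k => pvQ s nt k = true) s.length

lemma pvRep_toNat (nt : List Char) (i : Int) :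
    PySem.List.pyRepeat nt i = PySem.List.pyRepeat nt ((i.toNat : Nat) : Int) := by
  rfl

lemma pvRep_succ (nt : List Char) (k : Nat) :
    PySem.List.pyRepeat nt (((k + 1 : Nat)) : Int) = nt ++ PySem.List.pyRepeat nt (k : Int) := by
  simp [PySem.List.pyRepeat, List.replicate_succ]

lemma pvRep_length (nt : List Char) (k : Nat) :
    (PySem.List.pyRepeat nt ((k : Nat) : Int)).length = k * nt.length := by
  simp [PySem.List.pyRepeat, List.length_flatten, List.map_replicate, List.sum_replicate,
    smul_eq_mul]

lemma pvQ_zero (s nt : List Char) : pvQ s nt 0 = true := by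
  simp [pvQ, PySem.List.pyRepeat, PySem.Chars.isIn_nil]

lemma pvQ_len (s nt : List Char) (k : Nat) (h : pvQ s nt k = true) : k * nt.length ≤ s.length := by
  rw [pvQ, PySem.Chars.isIn_iff_infix] at h
  have := h.length_le
  rwa [pvRep_length] at this

lemma pvQ_succ (s nt : List Char) (k : Nat) (h : pvQ s nt (k + 1) = true) : pvQ s nt k = true := by
  rw [pvQ, PySem.Chars.isIn_iff_infix] at h ⊢
  exact ((List.suffix_append nt _).isInfix).trans (by rwa [← pvRep_succ])

lemma pvQ_mono (s nt : List Char) (k j : Nat) (hkj : k ≤ j) (h : pvQ s nt j = true) :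
    pvQ s nt k = true := by
  induction j with
  | zero =>
    have hk0 : k = 0 := by omega
    rwa [hk0]
  | succ j ih =>
    rcases Nat.lt_or_ge k (j + 1) with hlt | hge
    · exact ih (by omega) (pvQ_succ s nt j h)
    · have : k = j + 1 := by omega
      rwa [this]

lemma pvQ_iff (s nt : List Char) (hm : nt ≠ []) (k : Nat) :
    pvQ s nt k = true ↔ k ≤ pvK s nt := by
  constructor
  · intro h
    have hk : k ≤ s.length := by
      have h1 := pvQ_len s nt k h
      have h2 : 1 ≤ nt.length := List.length_pos_iff.mpr hm
      calc k = k * 1 := by omega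
        _ ≤ k * nt.length := Nat.mul_le_mul_left k h2
        _ ≤ s.length := h1
    exact Nat.le_findGreatest hk h
  · intro h
    have hK : pvQ s nt (pvK s nt) = true := by
      have := Nat.findGreatest_spec (P := fun k => pvQ s nt k = true) (n := s.length)
        (Nat.zero_le _) (pvQ_zero s nt)
      simpa [pvK] using this
    exact pvQ_mono s nt k _ h hK

-- characterisation of the A loop: from largest = a-1 it returns min K (b-1) (or a-1 if range empty)
lemma pvALoop_eq (s nt : List Char) (K : Nat)
    (hQ : ∀ k : Nat, pvQ s nt k = true ↔ k ≤ K) :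
    ∀ (fn : Nat) (a b : Int), (b - a).toNat = fn → 1 ≤ a → a - 1 ≤ (K : Int) →
      pvALoop s nt (PySem.List.pyRange a b 1) (a - 1) =
        if b ≤ a then a - 1 else min (K : Int) (b - 1) := by
  intro fn
  induction fn with
  | zero =>
    intro a b h0 ha hK
    have hba : b ≤ a := by omega
    rw [PySem.List.pyRange_one_eq_nil hba, if_pos hba]
    rfl
  | succ fn ih =>
    intro a b h0 ha hK
    have hab : a < b := by omega
    rw [PySem.List.pyRange_one_cons hab]
    simp only [pvALoop]
    have htest : PySem.Chars.isIn (PySem.List.pyRepeat nt a) s = pvQ s nt a.toNat := by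
      rw [pvQ, ← pvRep_toNat]
    rw [htest]
    by_cases hQa : a.toNat ≤ K
    · rw [if_pos ((hQ a.toNat).mpr hQa)]
      have haK : a ≤ (K : Int) := by omega
      have hih := ih (a + 1) b (by omega) (by omega) (by omega)
      have h11 : a + 1 - 1 = a := by ring
      rw [h11] at hih
      rw [hih]
      have hne : ¬ b ≤ a := by omega
      rw [if_neg hne]
      split_ifs with h
      · omega
      · rfl
    · rw [if_neg (by simpa using (fun h => hQa ((hQ a.toNat).mp h)))]
      have : (K : Int) < a := by omega
      rw [if_neg (by omega)]
      omega

-- characterisation of the B loop: binary search converges to K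
lemma pvBSearch_eq (s nt : List Char) (K : Nat)
    (hQ : ∀ k : Nat, pvQ s nt k = true ↔ k ≤ K) :
    ∀ (fuel : Nat) (lo hi : Int), (hi - lo).toNat ≤ fuel → 0 ≤ lo →
      lo ≤ (K : Int) → (K : Int) ≤ hi → pvBSearch s nt fuel lo hi = (K : Int) := by
  intro fuel
  induction fuel with
  | zero =>
    intro lo hi hf h0 hloK hKhi
    have : lo = (K : Int) := by omega
    simpa [pvBSearch] using this
  | succ fuel ih =>
    intro lo hi hf h0 hloK hKhi
    simp only [pvBSearch]
    by_cases hlh : lo < hi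
    · rw [if_pos hlh]
      have harg : lo + hi + 1 = lo + 1 + hi := by ring
      rw [harg]
      have hmb := PySem.Int.floordiv_two_mid_bounds (lo := lo + 1) (hi := hi) (by omega)
      set md := PySem.Int.floordiv (lo + 1 + hi) 2 with hmd
      have hmd0 : 0 ≤ md := by omega
      have htest : PySem.Chars.isIn (PySem.List.pyRepeat nt md) s = pvQ s nt md.toNat := by
        rw [pvQ, ← pvRep_toNat]
      rw [htest]
      by_cases hq : md.toNat ≤ K
      · rw [if_pos ((hQ md.toNat).mpr hq)]
        exact ih md hi (by omega) (by omega) (by omega) hKhi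
      · rw [if_neg (by simpa using (fun h => hq ((hQ md.toNat).mp h)))]
        have : (K : Int) < md := by omega
        exact ih lo (md - 1) (by omega) h0 hloK (by omega)
    · rw [if_neg hlh]
      omega

-- closed forms of the two ports, under nt ≠ []
lemma get_longest_nt_closed (seq nt : String) (hm : nt.toList ≠ []) :
    get_longest_nt seq nt =
      if (seq.toList.length : Int) ≤ 1 then 0
      else min ((pvK seq.toList nt.toList : Nat) : Int) ((seq.toList.length : Int) - 1) := by
  have h := pvALoop_eq seq.toList nt.toList (pvK seq.toList nt.toList)
    (pvQ_iff seq.toList nt.toList hm) (((seq.toList.length : Int) - 1)).toNat 1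
    (seq.toList.length : Int) (by omega) (by omega) (by omega)
  have h0 : (1 : Int) - 1 = 0 := by ring
  rw [h0] at h
  unfold get_longest_nt
  simpa using h

lemma get_longest_nt_alt_closed (seq nt : String) (hm : nt.toList ≠ []) :
    get_longest_nt_alt seq nt = ((pvK seq.toList nt.toList : Nat) : Int) := by
  have hmpos : (0 : Int) < (nt.toList.length : Int) := by
    exact_mod_cast List.length_pos_iff.mpr hm
  have hKhi : ((pvK seq.toList nt.toList : Nat) : Int) ≤
      PySem.Int.floordiv (seq.toList.length : Int) (nt.toList.length : Int) := by
    rw [PySem.Int.le_floordiv_iff_mul_le hmpos]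
    have hQK : pvQ seq.toList nt.toList (pvK seq.toList nt.toList) = true :=
      (pvQ_iff seq.toList nt.toList hm _).mpr le_rfl
    exact_mod_cast pvQ_len seq.toList nt.toList _ hQK
  have h := pvBSearch_eq seq.toList nt.toList (pvK seq.toList nt.toList)
    (pvQ_iff seq.toList nt.toList hm)
    (PySem.Int.floordiv (seq.toList.length : Int) (nt.toList.length : Int)).toNat 0
    (PySem.Int.floordiv (seq.toList.length : Int) (nt.toList.length : Int))
    (by omega) le_rfl (by omega) hKhi
  unfold get_longest_nt_alt
  simpa using h

-- outside D_, the maximal count stays below len(seq)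
lemma pvK_le_sub_one (seq nt : String) (hm : nt.toList ≠ [])
    (hnD : ¬ D_get_longest_nt seq nt) (hn : 1 ≤ seq.toList.length) :
    pvK seq.toList nt.toList ≤ seq.toList.length - 1 := by
  by_contra hc
  have hKle : pvK seq.toList nt.toList ≤ seq.toList.length := Nat.findGreatest_le _
  have hKn : pvK seq.toList nt.toList = seq.toList.length := by omega
  have hQn : pvQ seq.toList nt.toList seq.toList.length = true :=
    (pvQ_iff seq.toList nt.toList hm _).mpr (by omega)
  have hlen := pvQ_len seq.toList nt.toList _ hQn
  have hm1 : nt.toList.length = 1 := by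
    have h1 : 1 ≤ nt.toList.length := List.length_pos_iff.mpr hm
    nlinarith
  obtain ⟨c, hc'⟩ := List.length_eq_one_iff.mp hm1
  have hinf : PySem.List.pyRepeat nt.toList ((seq.toList.length : Nat) : Int) <:+: seq.toList := by
    rw [pvQ, PySem.Chars.isIn_iff_infix] at hQn
    exact hQn
  have heq : PySem.List.pyRepeat nt.toList ((seq.toList.length : Nat) : Int) = seq.toList :=
    hinf.eq_of_length (by rw [pvRep_length, hm1]; omega)
  have hrep : seq.toList = List.replicate seq.toList.length c := by
    rw [← heq, hc', PySem.List.pyRepeat_singleton]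
    simp
  apply hnD
  refine ⟨hm1, ?_, ?_⟩
  · intro h; rw [h] at hn; simp at hn
  · rw [List.all_eq_true]
    intro x hx
    rw [hrep] at hx
    simp [hc', List.eq_of_mem_replicate hx]

-- inside D_, the maximal count is exactly len(seq)
lemma pvK_eq_of_D (seq nt : String) (hD : D_get_longest_nt seq nt) :
    pvK seq.toList nt.toList = seq.toList.length := by
  obtain ⟨hm1, hne, hall⟩ := hD
  obtain ⟨c, hc'⟩ := List.length_eq_one_iff.mp hm1
  rw [List.all_eq_true] at hall
  have hrep : seq.toList = List.replicate seq.toList.length c :=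
    List.eq_replicate_of_mem (fun b hb => by
      have := hall b hb; rw [hc'] at this; simpa using this)
  have hQn : pvQ seq.toList nt.toList seq.toList.length = true := by
    rw [pvQ, PySem.Chars.isIn_iff_infix, hc', PySem.List.pyRepeat_singleton]
    simp only [Int.toNat_natCast]
    have hrw : List.replicate seq.toList.length c = seq.toList := hrep.symm
    rw [hrw]
  exact Nat.le_antisymm (Nat.findGreatest_le _) (Nat.le_findGreatest le_rfl hQn)

-- ===== VERDICT (by name: the statement is the Claim_ definition above) =====
theorem get_longest_nt_spec : Claim_unchanged_get_longest_nt := by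
  intro seq nt _ hpre hnD
  have hm : nt.toList ≠ [] := hpre
  rw [get_longest_nt_closed seq nt hm, get_longest_nt_alt_closed seq nt hm]
  by_cases hn : 1 ≤ seq.toList.length
  · have hK := pvK_le_sub_one seq nt hm hnD hn
    split_ifs with h
    · omega
    · omega
  · have hn0 : seq.toList.length = 0 := by omega
    have hKle : pvK seq.toList nt.toList ≤ seq.toList.length := Nat.findGreatest_le _
    split_ifs with h
    · omega
    · omega

set_option maxRecDepth 4096 in
theorem get_longest_nt_changed : Claim_changed_get_longest_nt := by
  unfold Claim_changed_get_longest_nt; decide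

theorem get_longest_nt_tight : Claim_exact_get_longest_nt := by
  intro seq nt _ hpre hD
  have hm : nt.toList ≠ [] := hpre
  have hn : 1 ≤ seq.toList.length := by
    have := hD.2.1
    exact List.length_pos_iff.mpr this
  rw [get_longest_nt_closed seq nt hm, get_longest_nt_alt_closed seq nt hm,
    pvK_eq_of_D seq nt hD]
  split_ifs with h
  · omega
  · omega
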